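-- pv_equiv track=rewrite | github.com/meintechblog/multi-command-runner | app/main.py | _next_clone_name
-- ===== SOURCE A (Python) =====
-- from typing import Any, Dict, Iterable, List, Optional, Tuple
--
-- def _next_clone_name(base_name: str, existing_names: Iterable[str], fallback: str) -> str:
--     base = str(base_name or "").strip() or fallback
--     existing = {str(name or "").strip().casefold() for name in existing_names}
--
--     first = f"{base} (Kopie)"
--     if first.casefold() not in existing:
--         return first
--
--     i = 2
--     while True:
--         candidate = f"{base} (Kopie {i})"
--         if candidate.casefold() not in existing:
--             return candidate
--         i += 1
-- ===== SOURCE B (Python) =====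
-- def _next_clone_name(base_name, existing_names, fallback):
--     base = str(base_name or "").strip() or fallback
--     first = f"{base} (Kopie)".casefold()
--     prefix = f"{base} (Kopie ".casefold()
--     used = set()
--     for name in existing_names:
--         n = _clone_slot(first, prefix, str(name or "").strip().casefold())
--         if n is not None:
--             used.add(n)
--     i = 1
--     while i in used:
--         i += 1
--     return f"{base} (Kopie)" if i == 1 else f"{base} (Kopie {i})"
--
--
-- def _clone_slot(first, prefix, name):
--     """Clone-slot number a taken name occupies: 1 for the bare '(Kopie)' form,
--     n for a numbered '(Kopie n)' form with n >= 2; None for unrelated names."""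
--     if name == first:
--         return 1
--     if name.startswith(prefix) and name.endswith(")"):
--         mid = name[len(prefix):-1]
--         if mid.isdigit() and mid[0] != "0":
--             n = int(mid)
--             if n >= 2:
--                 return n
--     return None
-- ===== Notes on version B (the rewrite author's own statement) =====
-- stated objective: alternative
-- what changed: Instead of probing candidate names one by one against a set of all existing names, B parses each existing name once into the clone-slot number it occupies (1 for 'base (Kopie)', n for a canonical 'base (Kopie n)'), collects those numbers into a set, and then returns the smallest free slot.
import Mathlib
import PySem

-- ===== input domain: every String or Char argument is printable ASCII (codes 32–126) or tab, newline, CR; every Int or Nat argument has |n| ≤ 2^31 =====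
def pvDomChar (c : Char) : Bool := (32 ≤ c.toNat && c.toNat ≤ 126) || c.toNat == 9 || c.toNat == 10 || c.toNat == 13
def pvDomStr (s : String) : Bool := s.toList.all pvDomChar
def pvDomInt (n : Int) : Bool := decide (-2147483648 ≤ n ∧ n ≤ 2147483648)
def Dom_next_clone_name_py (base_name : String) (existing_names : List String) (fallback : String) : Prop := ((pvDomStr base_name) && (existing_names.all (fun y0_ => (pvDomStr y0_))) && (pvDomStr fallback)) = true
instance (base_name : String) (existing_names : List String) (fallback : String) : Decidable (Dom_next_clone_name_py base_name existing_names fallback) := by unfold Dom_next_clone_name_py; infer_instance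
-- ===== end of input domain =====

-- B replaces A's probe-candidates-against-a-name-set loop by one parse pass that maps each
-- existing name to the clone slot it occupies, then takes the smallest free slot (alternative
-- decomposition, same observable behaviour; proved equal on all inputs).

-- ===== PORT A =====
-- A's unbounded `while True` probing loop, fuel-guarded only to be total:
-- fuel existing_names.length + 1 always suffices (proved below), the [] branch is unreachable.
def pvALoop (existing : PySem.Set (List Char)) (base : List Char) : Int → Nat → List Char
  | _, 0 => []
  | i, fuel+1 =>
    let candidate := base ++ " (Kopie ".toList ++ PySem.Int.toChars i ++ [')']
    if PySem.Chars.lower candidate ∈ existing then pvALoop existing base (i+1) fuel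
    else candidate

def next_clone_name_py (base_name : String) (existing_names : List String) (fallback : String) : String :=
  let stripped := PySem.Chars.strip base_name.toList
  let base := if stripped = [] then fallback.toList else stripped
  let existing : PySem.Set (List Char) :=
    PySem.Set.ofList (existing_names.map (fun name => PySem.Chars.lower (PySem.Chars.strip name.toList)))
  let first := base ++ " (Kopie)".toList
  if PySem.Chars.lower first ∉ existing then String.ofList first
  else String.ofList (pvALoop existing base 2 (existing_names.length + 1))

-- ===== PORT B =====
-- int(mid) of Source B: here mid is guaranteed a nonempty string of ASCII digits '0'-'9'
-- (checked by mid.isdigit() just before), and on that domain int(mid) is exactly this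
-- decimal fold — the hand port is exact there.
def pvDigitsVal (digits : List Char) : Int :=
  digits.foldl (fun n ch => n * 10 + ((ch.toNat : Int) - 48)) 0

-- helper _clone_slot of Source B
def pvSlot (firstL pref s : List Char) : Option Int :=
  if s = firstL then some 1
  else if PySem.Chars.startswith s pref && PySem.Chars.endswith s [')'] then
    let mid := PySem.List.slice s (some (pref.length : Int)) (some (-1))
    if PySem.Chars.strIsdigit mid = true ∧ PySem.List.pyGet? mid 0 ≠ some '0' then
      let n := pvDigitsVal mid
      if 2 ≤ n then some n else none
    else none
  else none

-- Source B's `while i in used: i += 1`, fuel-guarded (fuel existing_names.length + 2 suffices, proved below)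
def pvBLoop (used : PySem.Set Int) : Int → Nat → Int
  | i, 0 => i
  | i, fuel+1 => if i ∈ used then pvBLoop used (i+1) fuel else i

def next_clone_name_py_alt (base_name : String) (existing_names : List String) (fallback : String) : String :=
  let stripped := PySem.Chars.strip base_name.toList
  let base := if stripped = [] then fallback.toList else stripped
  let firstL := PySem.Chars.lower (base ++ " (Kopie)".toList)
  let pref := PySem.Chars.lower (base ++ " (Kopie ".toList)
  let used : PySem.Set Int := existing_names.foldl (fun u name =>
      match pvSlot firstL pref (PySem.Chars.lower (PySem.Chars.strip name.toList)) with
      | some n => u.add n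
      | none => u) PySem.Set.empty
  let i := pvBLoop used 1 (existing_names.length + 2)
  if i = 1 then String.ofList (base ++ " (Kopie)".toList)
  else String.ofList (base ++ " (Kopie ".toList ++ PySem.Int.toChars i ++ [')'])

-- ===== PRECONDITION & SPEC =====
def Spec_next_clone_name_py (base_name : String) (existing_names : List String) (fallback : String) (out : String) : Prop := out = next_clone_name_py_alt base_name existing_names fallback
instance (base_name : String) (existing_names : List String) (fallback : String) (out : String) : Decidable (Spec_next_clone_name_py base_name existing_names fallback out) := by unfold Spec_next_clone_name_py; infer_instance

-- ===== CLAIM (what is proved, stated in full; the proofs are below) =====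
def Claim_equal_next_clone_name_py : Prop := ∀ (base_name : String) (existing_names : List String) (fallback : String), Dom_next_clone_name_py base_name existing_names fallback → Spec_next_clone_name_py base_name existing_names fallback (next_clone_name_py base_name existing_names fallback)

-- ===== LEMMAS AND PROOFS =====

def pvRepr (n : Nat) : List Char :=
  if h : n < 10 then [Nat.digitChar n]
  else pvRepr (n / 10) ++ [Nat.digitChar (n % 10)]
decreasing_by exact Nat.div_lt_self (by omega) (by omega)

lemma pvToDigitsCore (fuel : Nat) : ∀ (n : Nat) (ds : List Char), n < 10 ^ (fuel+1) →
    Nat.toDigitsCore 10 (fuel+1) n ds = pvRepr n ++ ds := by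
  induction fuel with
  | zero =>
    intro n ds h
    rw [pvRepr, Nat.toDigitsCore]
    norm_num at h
    simp [Nat.div_eq_of_lt h, Nat.mod_eq_of_lt h, h]
  | succ f ih =>
    intro n ds h
    rw [Nat.toDigitsCore]
    by_cases h10 : n < 10
    · rw [pvRepr]
      simp [Nat.div_eq_of_lt h10, Nat.mod_eq_of_lt h10, h10]
    · have hd : ¬ n / 10 = 0 := fun hz => h10 (by omega)
      rw [if_neg hd, ih (n / 10) _ (by
        rw [Nat.div_lt_iff_lt_mul (by norm_num)]
        calc n < 10 ^ (f+1+1) := h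
        _ = 10 ^ (f+1) * 10 := by ring)]
      conv_rhs => rw [pvRepr]
      rw [dif_neg h10]
      simp

lemma pvToChars_nonneg (i : Int) (h : 0 ≤ i) : PySem.Int.toChars i = pvRepr i.toNat := by
  rw [PySem.Int.toChars, if_neg (by omega), Nat.toDigits]
  have h1 : i.toNat < 10 ^ (i.toNat + 1) :=
    lt_of_lt_of_le (Nat.lt_pow_self (by norm_num)) (Nat.pow_le_pow_right (by norm_num) (by omega))
  rw [pvToDigitsCore _ _ _ h1]
  simp

lemma pvRepr_ne_nil (n : Nat) : pvRepr n ≠ [] := by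
  rw [pvRepr]
  split <;> simp

lemma pvDigitChar_isdigit (d : Nat) (h : d < 10) : PySem.Chars.isdigit (Nat.digitChar d) = true := by
  interval_cases d <;> decide

lemma pvDigitChar_val (d : Nat) (h : d < 10) : ((Nat.digitChar d).toNat : Int) - 48 = d := by
  interval_cases d <;> decide

lemma pvRepr_digits (n : Nat) : ∀ c ∈ pvRepr n, PySem.Chars.isdigit c = true := by
  fun_induction pvRepr with
  | case1 n h => simp [pvDigitChar_isdigit n h]
  | case2 n h ih =>
    intro c hc
    rcases List.mem_append.1 hc with hc | hc
    · exact ih c hc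
    · simp at hc
      rw [hc]
      exact pvDigitChar_isdigit _ (Nat.mod_lt _ (by norm_num))

lemma pvRepr_head (n : Nat) (h : 0 < n) : (pvRepr n).head? ≠ some '0' := by
  fun_induction pvRepr with
  | case1 n hlt =>
    simp only [List.head?_cons, ne_eq, Option.some.injEq]
    interval_cases n <;> decide
  | case2 n hlt ih =>
    rw [List.head?_append_of_ne_nil _ (pvRepr_ne_nil _)]
    exact ih (by omega)

lemma pvVal_repr (n : Nat) : pvDigitsVal (pvRepr n) = n := by
  fun_induction pvRepr with
  | case1 n h => simp [pvDigitsVal, pvDigitChar_val n h]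
  | case2 n h ih =>
    unfold pvDigitsVal at *
    rw [List.foldl_append, ih]
    simp only [List.foldl_cons, List.foldl_nil]
    rw [pvDigitChar_val _ (Nat.mod_lt _ (by norm_num))]
    omega

lemma pvIsdigit_bounds (c : Char) (h : PySem.Chars.isdigit c = true) : 48 ≤ c.toNat ∧ c.toNat ≤ 57 := by
  simp only [PySem.Chars.isdigit, Bool.and_eq_true, decide_eq_true_eq, Char.le_def,
    UInt32.le_iff_toNat_le] at h
  exact h

lemma pvChar_of_toNat (c : Char) (k : Nat) (h : c.toNat = k) : c = Char.ofNat k := by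
  rw [← h, Char.ofNat_toNat]

lemma pvChar_of_isdigit (c : Char) (h : PySem.Chars.isdigit c = true) : Nat.digitChar (c.toNat - 48) = c := by
  obtain ⟨h1, h2⟩ := pvIsdigit_bounds c h
  have : c.toNat = 48 ∨ c.toNat = 49 ∨ c.toNat = 50 ∨ c.toNat = 51 ∨ c.toNat = 52 ∨ c.toNat = 53 ∨
      c.toNat = 54 ∨ c.toNat = 55 ∨ c.toNat = 56 ∨ c.toNat = 57 := by omega
  rcases this with h'|h'|h'|h'|h'|h'|h'|h'|h'|h' <;>
    (rw [pvChar_of_toNat c _ h']; decide)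

lemma pvLowerChar_digit (c : Char) (h : PySem.Chars.isdigit c = true) : PySem.Chars.lowerChar c = c := by
  obtain ⟨h1, h2⟩ := pvIsdigit_bounds c h
  rw [PySem.Chars.lowerChar, if_neg]
  simp only [PySem.Chars.isupper, Bool.and_eq_true, decide_eq_true_eq, Char.le_def,
    UInt32.le_iff_toNat_le, not_and]
  intro hA
  exfalso
  have h65 : (('A' : Char).val).toNat = 65 := rfl
  have hcv : c.toNat = c.val.toNat := rfl
  omega

lemma pvCanonical (m : List Char) (h1 : m ≠ []) (h2 : ∀ c ∈ m, PySem.Chars.isdigit c = true)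
    (h3 : m.head? ≠ some '0') : 1 ≤ pvDigitsVal m ∧ pvRepr (pvDigitsVal m).toNat = m := by
  induction m using List.reverseRecOn with
  | nil => exact absurd rfl h1
  | append_singleton xs c ih =>
    have hc := pvIsdigit_bounds c (h2 c (by simp))
    have hval : pvDigitsVal (xs ++ [c]) = pvDigitsVal xs * 10 + ((c.toNat : Int) - 48) := by
      unfold pvDigitsVal
      rw [List.foldl_append]
      simp
    rcases eq_or_ne xs [] with hxs | hxs
    · subst hxs
      simp only [List.nil_append] at *
      have hc0 : c ≠ '0' := by
        intro h; rw [h] at h3; exact h3 rfl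
      have hne48 : c.toNat ≠ 48 := by
        intro h; exact hc0 (by rw [pvChar_of_toNat c _ h])
      have hv : pvDigitsVal [c] = (c.toNat : Int) - 48 := by
        unfold pvDigitsVal; simp
      constructor
      · omega
      · rw [hv, pvRepr]
        have hlt : ((c.toNat : Int) - 48).toNat < 10 := by omega
        rw [dif_pos hlt]
        have : ((c.toNat : Int) - 48).toNat = c.toNat - 48 := by omega
        rw [this, pvChar_of_isdigit c (h2 c (by simp))]
    · have hhead : (xs ++ [c]).head? = xs.head? := List.head?_append_of_ne_nil _ hxs
      rw [hhead] at h3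
      obtain ⟨ih1, ih2⟩ := ih hxs (fun d hd => h2 d (List.mem_append_left _ hd)) h3
      have hge : 1 ≤ pvDigitsVal (xs ++ [c]) := by omega
      refine ⟨hge, ?_⟩
      rw [hval, pvRepr]
      have h10 : ¬ (pvDigitsVal xs * 10 + ((c.toNat : Int) - 48)).toNat < 10 := by omega
      rw [dif_neg h10]
      have hdiv : (pvDigitsVal xs * 10 + ((c.toNat : Int) - 48)).toNat / 10 = (pvDigitsVal xs).toNat := by omega
      have hmod : (pvDigitsVal xs * 10 + ((c.toNat : Int) - 48)).toNat % 10 = c.toNat - 48 := by omega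
      rw [hdiv, hmod, ih2, pvChar_of_isdigit c (h2 c (by simp))]

lemma pvLower_digits (m : List Char) (h : ∀ c ∈ m, PySem.Chars.isdigit c = true) :
    PySem.Chars.lower m = m := by
  rw [PySem.Chars.lower]
  rw [List.map_congr_left (fun c hc => pvLowerChar_digit c (h c hc))]
  exact List.map_id _

lemma pvLowFirst (base : List Char) :
    PySem.Chars.lower (base ++ " (Kopie)".toList) = PySem.Chars.lower base ++ " (kopie)".toList := by
  rw [PySem.Chars.lower, PySem.Chars.lower, List.map_append]
  congr 1

lemma pvLowPref (base : List Char) :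
    PySem.Chars.lower (base ++ " (Kopie ".toList) = PySem.Chars.lower base ++ " (kopie ".toList := by
  rw [PySem.Chars.lower, PySem.Chars.lower, List.map_append]
  congr 1

lemma pvLowCand (base : List Char) (i : Int) (h : 0 ≤ i) :
    PySem.Chars.lower (base ++ " (Kopie ".toList ++ PySem.Int.toChars i ++ [')'])
      = PySem.Chars.lower base ++ " (kopie ".toList ++ PySem.Int.toChars i ++ [')'] := by
  rw [PySem.Chars.lower, PySem.Chars.lower, List.map_append, List.map_append, List.map_append]
  have hdig : List.map PySem.Chars.lowerChar (PySem.Int.toChars i) = PySem.Int.toChars i := by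
    have := pvLower_digits (PySem.Int.toChars i) (by
      rw [pvToChars_nonneg i h]; exact pvRepr_digits _)
    rw [PySem.Chars.lower] at this
    exact this
  rw [hdig]
  congr 2

lemma pvSlice_mid (p m : List Char) (c : Char) :
    PySem.List.slice (p ++ (m ++ [c])) (some (p.length : Int)) (some (-1)) = m := by
  simp only [PySem.List.slice, PySem.List.clampIdx]
  have hlen : (p ++ (m ++ [c])).length = p.length + m.length + 1 := by simp; omega
  rw [hlen]
  have h1 : ¬ ((p.length : Int) < 0) := by omega
  rw [if_neg h1]
  have h2 : ((-1 : Int) < 0) := by omega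
  rw [if_pos h2]
  have h3 : ¬ ((p.length + m.length + 1 : Nat) : Int) + (-1) < 0 := by omega
  rw [if_neg h3]
  have ha : min ((p.length : Int)).toNat (p.length + m.length + 1) = p.length := by omega
  have hb : (((p.length + m.length + 1 : Nat) : Int) + (-1)).toNat = p.length + m.length := by omega
  rw [ha, hb]
  have hc : p.length + m.length - p.length = m.length := by omega
  rw [hc, List.drop_left]
  exact List.take_left ..

lemma pvSlice_self (p : List Char) :
    PySem.List.slice p (some (p.length : Int)) (some (-1)) = [] := by
  simp only [PySem.List.slice, PySem.List.clampIdx]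
  have h1 : ¬ ((p.length : Int) < 0) := by omega
  rw [if_neg h1, if_pos (by omega : (-1:Int) < 0)]
  by_cases h : (p.length : Int) + (-1) < 0
  · rw [if_pos h]
    simp
  · rw [if_neg h]
    rw [show ((p.length : Int) + (-1)).toNat - min ((p.length : Int)).toNat p.length = 0 from by omega]
    simp

lemma pvPyGet0 {α : Type} (xs : List α) (hx : xs ≠ []) : PySem.List.pyGet? xs 0 = xs.head? := by
  simp [PySem.List.pyGet?, PySem.List.pyIdx?]
  cases xs with
  | nil => exact absurd rfl hx
  | cons a t => simp

lemma pvToChars_pos_facts (i : Int) (h : 2 ≤ i) :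
    (∀ c ∈ PySem.Int.toChars i, PySem.Chars.isdigit c = true) ∧ PySem.Int.toChars i ≠ [] ∧
      (PySem.Int.toChars i).head? ≠ some '0' ∧ pvDigitsVal (PySem.Int.toChars i) = i := by
  rw [pvToChars_nonneg i (by omega)]
  refine ⟨pvRepr_digits _, pvRepr_ne_nil _, pvRepr_head _ (by omega), ?_⟩
  rw [pvVal_repr]
  omega

lemma pvSlot_cand (lb : List Char) (i : Int) (h : 2 ≤ i) :
    pvSlot (lb ++ " (kopie)".toList) (lb ++ " (kopie ".toList)
      (lb ++ " (kopie ".toList ++ PySem.Int.toChars i ++ [')']) = some i := by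
  obtain ⟨hdig, hne, hhead, hval⟩ := pvToChars_pos_facts i h
  rw [pvSlot]
  rw [if_neg (by
    intro heq
    have hlen := congrArg List.length heq
    simp only [List.length_append] at hlen
    have e1 : (" (kopie ".toList : List Char).length = 8 := rfl
    have e2 : (" (kopie)".toList : List Char).length = 8 := rfl
    have e3 : ([')'] : List Char).length = 1 := rfl
    have h1 : (PySem.Int.toChars i).length ≠ 0 := fun hz => hne (List.eq_nil_of_length_eq_zero hz)
    omega)]
  have hsw : PySem.Chars.startswith (lb ++ " (kopie ".toList ++ PySem.Int.toChars i ++ [')'])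
      (lb ++ " (kopie ".toList) = true := by
    rw [PySem.Chars.startswith_iff]
    exact ⟨PySem.Int.toChars i ++ [')'], by simp⟩
  have hew : PySem.Chars.endswith (lb ++ " (kopie ".toList ++ PySem.Int.toChars i ++ [')']) [')'] = true := by
    rw [PySem.Chars.endswith_iff]
    exact ⟨lb ++ " (kopie ".toList ++ PySem.Int.toChars i, by simp⟩
  rw [hsw, hew]
  simp only [Bool.and_self, if_true]
  have hmid : PySem.List.slice (lb ++ " (kopie ".toList ++ PySem.Int.toChars i ++ [')'])
      (some ((lb ++ " (kopie ".toList).length : Int)) (some (-1)) = PySem.Int.toChars i := by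
    have := pvSlice_mid (lb ++ " (kopie ".toList) (PySem.Int.toChars i) ')'
    simpa [List.append_assoc] using this
  rw [hmid]
  rw [if_pos ?_]
  · rw [hval, if_pos h]
  · constructor
    · simp [PySem.Chars.strIsdigit, List.all_eq_true, hne]
      exact fun c hc => hdig c hc
    · rw [pvPyGet0 _ hne]
      exact fun hh => hhead hh

lemma pvSlot_inv (lb s : List Char) (i : Int)
    (h : pvSlot (lb ++ " (kopie)".toList) (lb ++ " (kopie ".toList) s = some i) :
    (i = 1 ∧ s = lb ++ " (kopie)".toList) ∨
      (2 ≤ i ∧ s = lb ++ " (kopie ".toList ++ PySem.Int.toChars i ++ [')']) := by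
  rw [pvSlot] at h
  by_cases h1 : s = lb ++ " (kopie)".toList
  · rw [if_pos h1] at h
    left
    refine ⟨?_, h1⟩
    simpa using h.symm
  · rw [if_neg h1] at h
    by_cases h2 : (PySem.Chars.startswith s (lb ++ " (kopie ".toList) && PySem.Chars.endswith s [')']) = true
    swap
    · rw [if_neg h2] at h
      exact absurd h (by simp)
    · rw [if_pos h2] at h
      obtain ⟨hsw, hew⟩ := Bool.and_eq_true_iff.1 h2
      obtain ⟨rest, hrest⟩ := (PySem.Chars.startswith_iff s _).1 hsw
      obtain ⟨t, ht⟩ := (PySem.Chars.endswith_iff s _).1 hew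
      rcases eq_or_ne rest [] with hrn | hrn
      · subst hrn
        rw [List.append_nil] at hrest
        rw [← hrest, pvSlice_self] at h
        exact absurd h (by simp [PySem.Chars.strIsdigit])
      · have hg : rest = rest.dropLast ++ [rest.getLast hrn] := (List.dropLast_append_getLast hrn).symm
        set m := rest.dropLast with hm
        have hs2 : s = (lb ++ " (kopie ".toList) ++ (m ++ [rest.getLast hrn]) := by
          rw [← hrest, ← hg]
        have hlast : rest.getLast hrn = ')' := by
          have hcombined : ((lb ++ " (kopie ".toList) ++ m) ++ [rest.getLast hrn] = t ++ [')'] := by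
            rw [List.append_assoc, ← hs2, ht]
          have hlen : ((lb ++ " (kopie ".toList) ++ m).length = t.length := by
            have := congrArg List.length hcombined
            simp only [List.length_append, List.length_cons, List.length_nil] at this
            simp only [List.length_append]
            omega
          have := (List.append_inj hcombined hlen).2
          simpa using this
        rw [hlast] at hs2
        rw [← hrest] at h
        rw [hg, hlast] at h
        rw [pvSlice_mid] at h
        by_cases h3 : PySem.Chars.strIsdigit m = true ∧ PySem.List.pyGet? m 0 ≠ some '0'
        swap
        · rw [if_neg h3] at h
          exact absurd h (by simp)
        · rw [if_pos h3] at h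
          obtain ⟨hdig, hz⟩ := h3
          have hmne : m ≠ [] := by
            intro hmn
            rw [hmn] at hdig
            exact absurd hdig (by decide)
          have hall : ∀ c ∈ m, PySem.Chars.isdigit c = true := by
            have := hdig
            simp [PySem.Chars.strIsdigit, List.all_eq_true] at this
            exact fun c hc => this.2 c hc
          have hhead : m.head? ≠ some '0' := by
            rw [← pvPyGet0 m hmne]
            exact hz
          obtain ⟨hge1, hrepr⟩ := pvCanonical m hmne hall hhead
          by_cases h4 : 2 ≤ pvDigitsVal m
          swap
          · rw [if_neg h4] at h
            exact absurd h (by simp)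
          · rw [if_pos h4] at h
            have hi : pvDigitsVal m = i := by simpa using h
            right
            refine ⟨by omega, ?_⟩
            rw [hs2, pvToChars_nonneg i (by omega), ← hi, hrepr]
            simp [List.append_assoc]

lemma pvMemFold (firstL pref : List Char) (l : List String) (j : Int) : ∀ (acc : PySem.Set Int),
    (j ∈ l.foldl (fun u name =>
        match pvSlot firstL pref (PySem.Chars.lower (PySem.Chars.strip name.toList)) with
        | some n => u.add n
        | none => u) acc ↔
      j ∈ acc ∨ ∃ name ∈ l, pvSlot firstL pref (PySem.Chars.lower (PySem.Chars.strip name.toList)) = some j) := by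
  induction l with
  | nil => simp
  | cons x xs ih =>
    intro acc
    rw [List.foldl_cons]
    cases hx : pvSlot firstL pref (PySem.Chars.lower (PySem.Chars.strip x.toList)) with
    | none =>
      rw [ih acc]
      simp [hx]
    | some n =>
      rw [ih (acc.add n)]
      rw [PySem.Set.mem_add]
      constructor
      · rintro ((hj | hj) | hj)
        · exact Or.inl hj
        · exact Or.inr ⟨x, by simp [hx, hj]⟩
        · obtain ⟨nm, hnm, hs⟩ := hj
          exact Or.inr ⟨nm, by simp [hnm], hs⟩
      · rintro (hj | ⟨nm, hnm, hs⟩)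
        · exact Or.inl (Or.inl hj)
        · rcases List.mem_cons.1 hnm with hnm | hnm
          · subst hnm
            rw [hx] at hs
            exact Or.inl (Or.inr (by simpa using hs.symm))
          · exact Or.inr ⟨nm, hnm, hs⟩

def pvCand (base : List Char) (i : Int) : List Char :=
  if i = 1 then base ++ " (Kopie)".toList
  else base ++ " (Kopie ".toList ++ PySem.Int.toChars i ++ [')']

def pvUsed (base : List Char) (names : List String) : PySem.Set Int :=
  names.foldl (fun u name =>
      match pvSlot (PySem.Chars.lower (base ++ " (Kopie)".toList)) (PySem.Chars.lower (base ++ " (Kopie ".toList))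
        (PySem.Chars.lower (PySem.Chars.strip name.toList)) with
      | some n => u.add n
      | none => u) PySem.Set.empty

lemma pvSlot_one (lb pref : List Char) :
    pvSlot (lb ++ " (kopie)".toList) pref (lb ++ " (kopie)".toList) = some 1 := by
  simp [pvSlot]

lemma pvEmpty_mem (j : Int) : j ∈ (PySem.Set.empty : PySem.Set Int) ↔ False := by
  simp [PySem.Set.empty]

lemma pvBlocked (base : List Char) (names : List String) (i : Int) (hi : 1 ≤ i) :
    (PySem.Chars.lower (pvCand base i) ∈
        PySem.Set.ofList (names.map (fun name => PySem.Chars.lower (PySem.Chars.strip name.toList)))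
      ↔ i ∈ pvUsed base names) := by
  rw [PySem.Set.mem_ofList, List.mem_map, pvUsed, pvMemFold]
  rw [pvLowFirst, pvLowPref]
  constructor
  · rintro ⟨name, hname, heq⟩
    refine Or.inr ⟨name, hname, ?_⟩
    rw [heq]
    rcases eq_or_lt_of_le hi with h1 | h2
    · rw [pvCand, if_pos h1.symm, pvLowFirst, ← h1]
      exact pvSlot_one _ _
    · rw [pvCand, if_neg (by omega), pvLowCand _ _ (by omega)]
      exact pvSlot_cand _ _ (by omega)
  · rintro (hf | ⟨name, hname, hs⟩)
    · exact absurd hf (by rw [pvEmpty_mem]; exact id)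
    · rcases pvSlot_inv _ _ _ hs with ⟨hi1, hseq⟩ | ⟨hi2, hseq⟩
      · refine ⟨name, hname, ?_⟩
        rw [hseq, hi1, pvCand, if_pos rfl, pvLowFirst]
      · refine ⟨name, hname, ?_⟩
        rw [hseq, pvCand, if_neg (by omega), pvLowCand _ _ (by omega)]

lemma pvBLoop_ge (used : PySem.Set Int) : ∀ (fuel : Nat) (i : Int), i ≤ pvBLoop used i fuel := by
  intro fuel
  induction fuel with
  | zero => intro i; rw [pvBLoop]
  | succ f ih =>
    intro i
    rw [pvBLoop]
    split
    · exact le_trans (by omega) (ih (i+1))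
    · exact le_refl i

lemma pvLoopEq (existing : PySem.Set (List Char)) (base : List Char) (used : PySem.Set Int)
    (H : ∀ j : Int, 2 ≤ j →
      ((PySem.Chars.lower (base ++ " (Kopie ".toList ++ PySem.Int.toChars j ++ [')']) ∈ existing) ↔ j ∈ used)) :
    ∀ (fuel : Nat) (i : Int), 2 ≤ i → (∃ k : Nat, k < fuel ∧ (i + k) ∉ used) →
      pvALoop existing base i fuel
        = base ++ " (Kopie ".toList ++ PySem.Int.toChars (pvBLoop used i fuel) ++ [')'] := by
  intro fuel
  induction fuel with
  | zero =>
    rintro i hi ⟨k, hk, -⟩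
    omega
  | succ f ih =>
    rintro i hi ⟨k, hk, hfree⟩
    rw [pvALoop, pvBLoop]
    by_cases hmem : i ∈ used
    · rw [if_pos ((H i hi).2 hmem), if_pos hmem]
      refine ih (i+1) (by omega) ?_
      have hk0 : k ≠ 0 := by
        intro h0
        rw [h0] at hfree
        simp at hfree
        exact hfree hmem
      exact ⟨k - 1, by omega, by
        have : i + 1 + ((k:Int) - 1) = i + k := by omega
        rw [show ((k-1 : Nat) : Int) = (k : Int) - 1 from by omega, this]
        exact hfree⟩
    · rw [if_neg (fun hc => hmem ((H i hi).1 hc)), if_neg hmem]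

lemma pvExistsFree (E : List (List Char)) (lb : List Char) :
    ∃ k : Nat, k < E.length + 1 ∧
      (lb ++ " (kopie ".toList ++ PySem.Int.toChars (2 + (k : Int)) ++ [')']) ∉ E := by
  by_contra hcon
  push Not at hcon
  have hmaps : ∀ k : Fin (E.length + 1),
      (lb ++ " (kopie ".toList ++ PySem.Int.toChars (2 + (k : Int)) ++ [')']) ∈ E.toFinset := by
    intro k
    rw [List.mem_toFinset]
    exact hcon k k.isLt
  have hinj : ∀ k k' : Fin (E.length + 1),
      (lb ++ " (kopie ".toList ++ PySem.Int.toChars (2 + (k : Int)) ++ [')'])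
        = (lb ++ " (kopie ".toList ++ PySem.Int.toChars (2 + (k' : Int)) ++ [')']) → k = k' := by
    intro k k' heq
    have h1 : PySem.Int.toChars (2 + (k : Int)) ++ [')'] = PySem.Int.toChars (2 + (k' : Int)) ++ [')'] := by
      have := heq
      rw [List.append_assoc, List.append_assoc, List.append_assoc, List.append_assoc] at this
      exact List.append_cancel_left (List.append_cancel_left this)
    have h2 : PySem.Int.toChars (2 + (k : Int)) = PySem.Int.toChars (2 + (k' : Int)) :=
      List.append_cancel_right h1
    have h3 := congrArg pvDigitsVal h2
    rw [pvToChars_nonneg _ (by omega), pvToChars_nonneg _ (by omega), pvVal_repr, pvVal_repr] at h3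
    have : (k : Nat) = (k' : Nat) := by omega
    exact Fin.ext this
  have hcard : E.length + 1 ≤ E.toFinset.card := by
    have := Finset.card_le_card_of_injOn
      (s := (Finset.univ : Finset (Fin (E.length + 1)))) (t := E.toFinset)
      (fun k : Fin (E.length + 1) => lb ++ " (kopie ".toList ++ PySem.Int.toChars (2 + (k : Int)) ++ [')'])
      (fun k _ => hmaps k) (fun k _ k' _ h => hinj k k' h)
    simpa using this
  have := List.toFinset_card_le E
  omega

theorem main_eq (b : String) (ns : List String) (fb : String) :
    next_clone_name_py b ns fb = next_clone_name_py_alt b ns fb := by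
  rw [next_clone_name_py, next_clone_name_py_alt]
  set base := if PySem.Chars.strip b.toList = [] then fb.toList else PySem.Chars.strip b.toList with hbase
  have hused : (ns.foldl (fun u name =>
      match pvSlot (PySem.Chars.lower (base ++ " (Kopie)".toList)) (PySem.Chars.lower (base ++ " (Kopie ".toList))
        (PySem.Chars.lower (PySem.Chars.strip name.toList)) with
      | some n => u.add n
      | none => u) PySem.Set.empty) = pvUsed base ns := rfl
  rw [hused]
  have hblock : ∀ j : Int, 1 ≤ j →
      (PySem.Chars.lower (pvCand base j) ∈
        PySem.Set.ofList (ns.map (fun name => PySem.Chars.lower (PySem.Chars.strip name.toList)))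
        ↔ j ∈ pvUsed base ns) := fun j hj => pvBlocked base ns j hj
  by_cases hb : PySem.Chars.lower (base ++ " (Kopie)".toList) ∈
      PySem.Set.ofList (ns.map (fun name => PySem.Chars.lower (PySem.Chars.strip name.toList)))
  · rw [if_neg (by simpa using hb)]
    have h1 : (1 : Int) ∈ pvUsed base ns := by
      rw [← hblock 1 (by omega)]
      rw [pvCand, if_pos rfl]
      exact hb
    have hstep : pvBLoop (pvUsed base ns) 1 (ns.length + 2) = pvBLoop (pvUsed base ns) 2 (ns.length + 1) := by
      rw [show ns.length + 2 = (ns.length + 1) + 1 from rfl, pvBLoop, if_pos h1]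
      norm_num
    rw [hstep]
    have hge : 2 ≤ pvBLoop (pvUsed base ns) 2 (ns.length + 1) := pvBLoop_ge _ _ 2
    rw [if_neg (by omega)]
    have hH : ∀ j : Int, 2 ≤ j →
        ((PySem.Chars.lower (base ++ " (Kopie ".toList ++ PySem.Int.toChars j ++ [')']) ∈
          PySem.Set.ofList (ns.map (fun name => PySem.Chars.lower (PySem.Chars.strip name.toList))))
          ↔ j ∈ pvUsed base ns) := by
      intro j hj
      have := hblock j (by omega)
      rw [pvCand, if_neg (by omega)] at this
      exact this
    obtain ⟨k, hk, hfree⟩ := pvExistsFree (ns.map (fun name => PySem.Chars.lower (PySem.Chars.strip name.toList))) (PySem.Chars.lower base)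
    have hklen : k < ns.length + 1 := by simpa using hk
    have hfree' : ((2 : Int) + (k : Int)) ∉ pvUsed base ns := by
      rw [← hblock (2 + k) (by omega)]
      rw [pvCand, if_neg (by omega), pvLowCand _ _ (by omega)]
      rw [PySem.Set.mem_ofList]
      exact hfree
    rw [pvLoopEq _ base _ hH (ns.length + 1) 2 (by omega) ⟨k, hklen, hfree'⟩]
  · rw [if_pos (by simpa using hb)]
    have h1 : (1 : Int) ∉ pvUsed base ns := by
      rw [← hblock 1 (by omega)]
      rw [pvCand, if_pos rfl]
      exact hb
    have hstep : pvBLoop (pvUsed base ns) 1 (ns.length + 2) = 1 := by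
      rw [show ns.length + 2 = (ns.length + 1) + 1 from rfl, pvBLoop, if_neg h1]
    rw [hstep, if_pos rfl]

-- ===== VERDICT (by name: the statement is the Claim_ definition above) =====
theorem next_clone_name_py_spec : Claim_equal_next_clone_name_py := by
  intro base_name existing_names fallback _
  unfold Spec_next_clone_name_py
  exact main_eq base_name existing_names fallback
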